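-- pv_equiv track=rewrite | github.com/rohanvinaik/TailChasingFixer | tailchasing/fixers/advanced/fix_strategies.py | _replace_placeholder_in_content
-- ===== SOURCE A (Python) =====
-- def _replace_placeholder_in_content(content: str, func_name: str, implementation: str) -> str:
--     """Replace placeholder function with implementation."""
--     lines = content.split('\n')
--
--     # Find function definition
--     func_start = -1
--     func_end = -1
--     indent_level = 0
--
--     for i, line in enumerate(lines):
--         if line.strip().startswith(f'def {func_name}('):
--             func_start = i
--             indent_level = len(line) - len(line.lstrip())
--
--             # Find end of function (next def or class at same or lower indentation)
--             for j in range(i + 1, len(lines)):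
--                 next_line = lines[j]
--                 if next_line.strip():
--                     next_indent = len(next_line) - len(next_line.lstrip())
--                     if (next_indent <= indent_level and
--                         (next_line.strip().startswith('def ') or
--                          next_line.strip().startswith('class '))):
--                         func_end = j
--                         break
--
--             if func_end == -1:
--                 func_end = len(lines)
--
--             break
--
--     if func_start != -1:
--         # Replace function with implementation
--         new_lines = lines[:func_start] + [implementation] + lines[func_end:]
--         return '\n'.join(new_lines)
--
--     return content
-- ===== SOURCE B (Python) =====
-- def _replace_placeholder_in_content(content: str, func_name: str, implementation: str) -> str:
--     """Replace placeholder function with implementation (single-pass state machine)."""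
--     target = f'def {func_name}('
--
--     def _ends(line: str, indent: int) -> bool:
--         stripped = line.strip()
--         return (bool(stripped)
--                 and len(line) - len(line.lstrip()) <= indent
--                 and (stripped.startswith('def ') or stripped.startswith('class ')))
--
--     out = []
--     state = 'copy'   # 'copy' before the match, 'skip' inside the function, 'done' after it
--     indent = 0
--     for line in content.split('\n'):
--         if state == 'copy':
--             if line.strip().startswith(target):
--                 state = 'skip'
--                 indent = len(line) - len(line.lstrip())
--                 out.append(implementation)
--             else:
--                 out.append(line)
--         elif state == 'skip':
--             if _ends(line, indent):
--                 state = 'done'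
--                 out.append(line)
--         else:
--             out.append(line)
--     if state == 'copy':
--         return content
--     return '\n'.join(out)
-- ===== Notes on version B (the rewrite author's own statement) =====
-- stated objective: alternative
-- what changed: Replaces A's index-based two-phase search (find func_start, nested scan for func_end, then slice-and-splice and join) with a single forward pass over the lines driven by a three-state machine (copy/skip/done) that emits output lines directly into an accumulator, substituting the implementation at the match and dropping lines until the function ends; no indices or list slicing are used.
import Mathlib
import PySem

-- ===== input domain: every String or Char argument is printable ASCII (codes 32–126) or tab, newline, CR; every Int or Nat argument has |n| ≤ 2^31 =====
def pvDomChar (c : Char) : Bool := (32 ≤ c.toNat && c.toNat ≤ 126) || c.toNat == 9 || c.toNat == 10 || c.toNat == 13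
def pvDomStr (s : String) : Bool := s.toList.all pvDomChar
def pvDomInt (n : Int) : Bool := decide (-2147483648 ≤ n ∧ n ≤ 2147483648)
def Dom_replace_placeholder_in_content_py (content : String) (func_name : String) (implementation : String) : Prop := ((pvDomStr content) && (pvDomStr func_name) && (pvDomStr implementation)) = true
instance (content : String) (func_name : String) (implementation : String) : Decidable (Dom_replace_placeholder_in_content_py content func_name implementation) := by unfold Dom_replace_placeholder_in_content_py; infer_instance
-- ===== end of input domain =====

-- B replaces A's two-phase index search + slice/splice with a single forward pass:
-- a three-state machine (copy/skip/done) that emits the output lines directly; objective: alternative.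

-- ===== PORT A =====
-- inner loop: 'for j in range(i+1, len(lines)): …' — finds func_end, -1 if no break
def pyA_inner (lines : List String) (indent_level : Int) : List Int → Int
  | [] => -1
  | j :: js =>
    let next_line := PySem.List.pyGetD lines j ""   -- lines[j]; j always in range here
    if PySem.Str.strip next_line ≠ "" then
      let next_indent := PySem.Str.len next_line - PySem.Str.len (PySem.Str.lstrip next_line)
      if next_indent ≤ indent_level ∧
         (PySem.Str.startswith (PySem.Str.strip next_line) "def " ||
          PySem.Str.startswith (PySem.Str.strip next_line) "class ") = true then j
      else pyA_inner lines indent_level js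
    else pyA_inner lines indent_level js

-- outer loop: 'for i, line in enumerate(lines): …' — break at the first match,
-- returning (func_start, func_end); i is the running enumerate index
def pyA_outer (lines : List String) (func_name : String) : Nat → List String → Option (Nat × Int)
  | _, [] => none
  | i, line :: rest =>
    if PySem.Str.startswith (PySem.Str.strip line) ("def " ++ func_name ++ "(") then
      let indent_level := PySem.Str.len line - PySem.Str.len (PySem.Str.lstrip line)
      let e := pyA_inner lines indent_level (PySem.List.pyRange ((i : Int) + 1) (PySem.List.len lines) 1)
      some (i, if e = -1 then PySem.List.len lines else e)
    else pyA_outer lines func_name (i + 1) rest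

def replace_placeholder_in_content_py (content : String) (func_name : String) (implementation : String) : String :=
  let lines := (PySem.Str.split? content "\n").getD []   -- sep ≠ "" so always some
  match pyA_outer lines func_name 0 lines with
  | some (fs, fe) =>
      PySem.Str.join "\n"
        (PySem.List.slice lines none (some (fs : Int)) ++ [implementation] ++
         PySem.List.slice lines (some fe) none)
  | none => content

-- ===== PORT B =====
-- Source B's helper _ends(line, indent)
def pyB_ends (line : String) (indent : Int) : Bool :=
  decide (PySem.Str.strip line ≠ "") &&
  decide (PySem.Str.len line - PySem.Str.len (PySem.Str.lstrip line) ≤ indent) &&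
  (PySem.Str.startswith (PySem.Str.strip line) "def " ||
   PySem.Str.startswith (PySem.Str.strip line) "class ")

-- Source B's state variable: 'copy' | 'skip' | 'done'
inductive PvState : Type
  | copy | skip | done
deriving DecidableEq, Repr

-- Source B's for-loop: one pass over the lines, threading (state, indent, out)
def pyB_loop (target impl : String) : List String → PvState → Int → List String → PvState × List String
  | [], st, _, out => (st, out)
  | line :: rest, st, indent, out =>
    match st with
    | .copy =>
      if PySem.Str.startswith (PySem.Str.strip line) target then
        pyB_loop target impl rest .skip
          (PySem.Str.len line - PySem.Str.len (PySem.Str.lstrip line)) (out ++ [impl])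
      else
        pyB_loop target impl rest .copy indent (out ++ [line])
    | .skip =>
      if pyB_ends line indent then
        pyB_loop target impl rest .done indent (out ++ [line])
      else
        pyB_loop target impl rest .skip indent out
    | .done => pyB_loop target impl rest .done indent (out ++ [line])

def replace_placeholder_in_content_py_alt (content : String) (func_name : String) (implementation : String) : String :=
  let lines := (PySem.Str.split? content "\n").getD []   -- sep ≠ "" so always some
  let r := pyB_loop ("def " ++ func_name ++ "(") implementation lines .copy 0 []
  if r.1 = .copy then content else PySem.Str.join "\n" r.2

-- ===== PRECONDITION & SPEC =====
def Spec_replace_placeholder_in_content_py (content : String) (func_name : String) (implementation : String) (out : String) : Prop := out = replace_placeholder_in_content_py_alt content func_name implementation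
instance (content : String) (func_name : String) (implementation : String) (out : String) : Decidable (Spec_replace_placeholder_in_content_py content func_name implementation out) := by unfold Spec_replace_placeholder_in_content_py; infer_instance

-- ===== CLAIM (what is proved, stated in full; the proofs are below) =====
def Claim_equal_replace_placeholder_in_content_py : Prop := ∀ (content : String) (func_name : String) (implementation : String), Dom_replace_placeholder_in_content_py content func_name implementation → Spec_replace_placeholder_in_content_py content func_name implementation (replace_placeholder_in_content_py content func_name implementation)

-- ===== LEMMAS AND PROOFS =====

def pyB_isDef (target : String) (line : String) : Bool :=
  PySem.Str.startswith (PySem.Str.strip line) target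

lemma findIdx?_getD {α : Type} (p : α → Bool) (l : List α) (i : Nat) (d : α)
    (h : List.findIdx? p l = some i) : i < l.length ∧ p (l.getD i d) := by
  rw [List.findIdx?_eq_some_iff_getElem] at h
  obtain ⟨h1, h2, _⟩ := h
  refine ⟨h1, ?_⟩
  rw [List.getD_eq_getElem l d h1]; exact h2

-- A's inner scan over range(s, len) equals a first-index search on lines.drop s.
lemma inner_eq (lines : List String) (indent_level : Int) :
    ∀ s : Nat, s ≤ lines.length →
    pyA_inner lines indent_level (PySem.List.pyRange (s : Int) (PySem.List.len lines) 1) =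
      (match (lines.drop s).findIdx? (fun l => pyB_ends l indent_level) with
       | some d => ((s + d : Nat) : Int)
       | none => -1) := by
  intro s hs
  induction hlen : lines.length - s generalizing s with
  | zero =>
    have hse : s = lines.length := by omega
    subst hse
    rw [PySem.List.pyRange_one_eq_nil (by simp [PySem.List.len_eq])]
    simp [pyA_inner]
  | succ n ih =>
    have hlt : s < lines.length := by omega
    rw [PySem.List.pyRange_one_cons (by simp [PySem.List.len_eq]; exact_mod_cast hlt)]
    rw [List.drop_eq_getElem_cons hlt, List.findIdx?_cons]
    have hget : PySem.List.pyGetD lines (s : Int) "" = lines[s] := by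
      simp [PySem.List.pyGetD_natCast, List.getElem?_eq_getElem hlt]
    have hrec := ih (s + 1) (by omega) (by omega)
    have hcast : ((s : Int) + 1) = ((s + 1 : Nat) : Int) := by push_cast; ring
    simp only [pyA_inner, hget]
    by_cases h1 : PySem.Str.strip lines[s] ≠ ""
    · by_cases h2 : PySem.Str.len lines[s] - PySem.Str.len (PySem.Str.lstrip lines[s]) ≤ indent_level ∧
          (PySem.Str.startswith (PySem.Str.strip lines[s]) "def " ||
           PySem.Str.startswith (PySem.Str.strip lines[s]) "class ") = true
      · have hb : pyB_ends lines[s] indent_level = true := by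
          unfold pyB_ends
          rw [Bool.and_eq_true, Bool.and_eq_true]
          exact ⟨⟨decide_eq_true h1, decide_eq_true h2.1⟩, h2.2⟩
        rw [if_pos h1, if_pos h2, hb]
        simp
      · have hb : pyB_ends lines[s] indent_level = false := by
          unfold pyB_ends
          rw [Bool.and_eq_false_iff, Bool.and_eq_false_iff]
          rw [not_and_or] at h2
          rcases h2 with h2 | h2
          · exact Or.inl (Or.inr (decide_eq_false h2))
          · exact Or.inr (Bool.not_eq_true _ ▸ h2)
        rw [if_pos h1, if_neg h2, hcast, hrec, hb]
        cases hfi : (lines.drop (s + 1)).findIdx? (fun l => pyB_ends l indent_level) with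
        | none => simp
        | some d => simp; ring
    · have hb : pyB_ends lines[s] indent_level = false := by
        unfold pyB_ends
        rw [Bool.and_eq_false_iff, Bool.and_eq_false_iff]
        exact Or.inl (Or.inl (decide_eq_false h1))
      rw [if_neg h1, hcast, hrec, hb]
      cases hfi : (lines.drop (s + 1)).findIdx? (fun l => pyB_ends l indent_level) with
      | none => simp
      | some d => simp; ring

-- A's outer loop from index i over lines.drop i equals a first-index search.
lemma outer_eq (lines : List String) (func_name : String) :
    ∀ i : Nat, i ≤ lines.length →
    pyA_outer lines func_name i (lines.drop i) =
      ((lines.drop i).findIdx? (pyB_isDef ("def " ++ func_name ++ "("))).map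
        (fun d =>
          let fs := i + d
          let indent_level := PySem.Str.len (lines.getD fs "") -
            PySem.Str.len (PySem.Str.lstrip (lines.getD fs ""))
          let e := pyA_inner lines indent_level (PySem.List.pyRange ((fs : Int) + 1) (PySem.List.len lines) 1)
          (fs, if e = -1 then PySem.List.len lines else e)) := by
  intro i hi
  induction hlen : lines.length - i generalizing i with
  | zero =>
    have : i = lines.length := by omega
    subst this
    simp [pyA_outer]
  | succ n ih =>
    have hlt : i < lines.length := by omega
    rw [List.drop_eq_getElem_cons hlt]
    rw [List.findIdx?_cons]
    have hget : lines.getD i "" = lines[i] := List.getD_eq_getElem lines "" hlt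
    by_cases hp : pyB_isDef ("def " ++ func_name ++ "(") lines[i] = true
    · have hp' : PySem.Str.startswith (PySem.Str.strip lines[i]) ("def " ++ func_name ++ "(") = true := hp
      simp only [pyA_outer, hp', if_pos, hp, Option.map_some]
      simp [List.getElem?_eq_getElem hlt]
    · have hp' : ¬ PySem.Str.startswith (PySem.Str.strip lines[i]) ("def " ++ func_name ++ "(") = true := hp
      have hpf : pyB_isDef ("def " ++ func_name ++ "(") lines[i] = false := by
        simpa using hp
      have hrec := ih (i + 1) (by omega) (by omega)
      have hstep : pyA_outer lines func_name i (lines[i] :: lines.drop (i + 1)) =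
          pyA_outer lines func_name (i + 1) (lines.drop (i + 1)) := by
        simp only [pyA_outer]
        rw [if_neg hp']
      rw [hstep, hrec, hpf]
      cases hfi : (lines.drop (i + 1)).findIdx? (pyB_isDef ("def " ++ func_name ++ "(")) with
      | none => simp
      | some d =>
        have e1 : i + 1 + d = i + (d + 1) := by omega
        simp [e1]
        ring_nf

-- B's done-phase copies the remaining lines.
lemma done_eq (target impl : String) (indent : Int) :
    ∀ (l acc : List String), pyB_loop target impl l .done indent acc = (.done, acc ++ l) := by
  intro l
  induction l with
  | nil => intro acc; simp [pyB_loop]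
  | cons x xs ih => intro acc; simp [pyB_loop, ih]

-- B's skip-phase characterised by the first-index search for the end predicate.
lemma skip_eq (target impl : String) (indent : Int) :
    ∀ (l acc : List String),
    pyB_loop target impl l .skip indent acc =
      (match l.findIdx? (fun x => pyB_ends x indent) with
       | none => (.skip, acc)
       | some d => (.done, acc ++ l.drop d)) := by
  intro l
  induction l with
  | nil => intro acc; simp [pyB_loop]
  | cons x xs ih =>
    intro acc
    rw [List.findIdx?_cons]
    by_cases h : pyB_ends x indent = true
    · simp only [pyB_loop, h, done_eq]
      simp
    · have hf : pyB_ends x indent = false := by simpa using h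
      simp only [pyB_loop, hf, ih]
      cases hfi : xs.findIdx? (fun y => pyB_ends y indent) with
      | none => simp
      | some d => simp

-- B's copy-phase characterised by the first-index search for the def line.
lemma copy_eq (target impl : String) :
    ∀ (l : List String) (indent : Int) (acc : List String),
    pyB_loop target impl l .copy indent acc =
      (match l.findIdx? (pyB_isDef target) with
       | none => (.copy, acc ++ l)
       | some d =>
           pyB_loop target impl (l.drop (d + 1)) .skip
             (PySem.Str.len (l.getD d "") - PySem.Str.len (PySem.Str.lstrip (l.getD d "")))
             (acc ++ l.take d ++ [impl])) := by
  intro l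
  induction l with
  | nil => intro indent acc; simp [pyB_loop]
  | cons x xs ih =>
    intro indent acc
    rw [List.findIdx?_cons]
    by_cases h : pyB_isDef target x = true
    · have h' : PySem.Str.startswith (PySem.Str.strip x) target = true := h
      simp only [pyB_loop, if_pos h', h]
      simp
    · have h' : ¬ PySem.Str.startswith (PySem.Str.strip x) target = true := h
      have hf : pyB_isDef target x = false := by simpa using h
      simp only [pyB_loop, if_neg h', hf, ih]
      cases hfi : xs.findIdx? (pyB_isDef target) with
      | none => simp
      | some d => simp

-- ===== VERDICT (by name: the statement is the Claim_ definition above) =====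
theorem replace_placeholder_in_content_py_spec : Claim_equal_replace_placeholder_in_content_py := by
  intro content func_name implementation _
  unfold Spec_replace_placeholder_in_content_py replace_placeholder_in_content_py
    replace_placeholder_in_content_py_alt
  dsimp only
  set lines := (PySem.Str.split? content "\n").getD [] with hlines
  have houter := outer_eq lines func_name 0 (by omega)
  simp only [List.drop_zero] at houter
  rw [houter, copy_eq]
  cases hfi : lines.findIdx? (pyB_isDef ("def " ++ func_name ++ "(")) with
  | none => simp
  | some fs =>
    obtain ⟨hlt, -⟩ := findIdx?_getD _ _ _ "" hfi
    simp only [Option.map_some, Nat.zero_add]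
    set ind := PySem.Str.len (lines.getD fs "") -
      PySem.Str.len (PySem.Str.lstrip (lines.getD fs "")) with hind
    rw [skip_eq]
    have hc : ((fs : Int) + 1) = ((fs + 1 : Nat) : Int) := by push_cast; ring
    have hinner := inner_eq lines ind (fs + 1) (by omega)
    simp only [PySem.List.len_eq] at hinner ⊢
    rw [hc, hinner]
    cases hfe : (lines.drop (fs + 1)).findIdx? (fun l => pyB_ends l ind) with
    | none =>
      simp only [reduceIte]
      rw [PySem.List.slice_to_natCast, PySem.List.slice_from_natCast]
      simp
    | some d =>
      have hne : ¬ ((fs + 1 + d : Nat) : Int) = -1 := by omega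
      rw [if_neg hne]
      rw [PySem.List.slice_to_natCast, PySem.List.slice_from_natCast]
      have hdd : (lines.drop (fs + 1)).drop d = lines.drop (fs + 1 + d) := by
        rw [List.drop_drop]
      simp [hdd]
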